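-- pv_equiv track=rewrite | github.com/noname2048/algo | programmers/64062/others.py | solution
-- ===== SOURCE A (Python) =====
-- def solution(stones, k):
--     answer = 0
--     start, end = 0, max(stones)
--     while start <= end:
--         mid = (start + end) // 2
--         count = 0
--         for s in stones:
--             if s - mid < 0:
--                 count += 1
--             else:
--                 count = 0
--             if count == k:
--                 end = mid - 1
--                 break
--         if count < k:
--             answer = mid
--             start = mid + 1
--
--     return answer
-- ===== SOURCE B (Python) =====
-- def solution(stones, k):
--     n = len(stones)
--     w = min(k, n)  # a window never extends past the list
--     # prefix maxima within blocks of size w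
--     pref = []
--     cur = 0
--     for i in range(n):
--         cur = stones[i] if i % w == 0 else max(cur, stones[i])
--         pref.append(cur)
--     # suffix maxima within blocks of size w
--     suf = []
--     cur = 0
--     for i in range(n - 1, -1, -1):
--         cur = stones[i] if (i % w == w - 1 or i == n - 1) else max(cur, stones[i])
--         suf.append(cur)
--     suf.reverse()
--     best = None
--     for i in range(n - w + 1):
--         m = max(suf[i], pref[i + w - 1])
--         if best is None or m < best:
--             best = m
--     return max(best, 0)  # never fewer than zero crossings
-- ===== Notes on version B (the rewrite author's own statement) =====
-- stated objective: faster
-- what changed: B replaces A's binary search over candidate answers (each candidate rescanning all stones) with a single linear pass: per-block prefix/suffix maxima give every sliding-window maximum, and the answer is the larger of 0 and their minimum.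
-- outside the precondition, e.g. on solution([1, 2], 0): A returns 0, B raises ZeroDivisionError; on solution([2, 3], -1): A does not finish within the time limit, B raises IndexError
import Mathlib
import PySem

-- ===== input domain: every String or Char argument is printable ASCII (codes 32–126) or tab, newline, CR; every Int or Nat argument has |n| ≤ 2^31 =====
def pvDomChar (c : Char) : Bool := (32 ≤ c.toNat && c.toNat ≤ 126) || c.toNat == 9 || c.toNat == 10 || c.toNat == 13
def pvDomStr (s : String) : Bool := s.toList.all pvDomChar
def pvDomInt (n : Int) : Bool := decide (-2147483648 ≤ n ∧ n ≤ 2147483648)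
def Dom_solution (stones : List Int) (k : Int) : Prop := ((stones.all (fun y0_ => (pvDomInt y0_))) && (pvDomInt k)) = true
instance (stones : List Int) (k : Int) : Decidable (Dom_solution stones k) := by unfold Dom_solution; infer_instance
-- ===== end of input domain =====

-- B replaces A's binary search on the answer (which rescans stones for each candidate) with a
-- single-pass block decomposition (per-block prefix/suffix maxima) computing the minimum of the
-- sliding-window maxima directly.

-- ===== PORT A =====
-- inner 'for s in stones' loop of A: returns (final count, whether it broke with count == k)
def scanA (mid k : Int) : List Int → Int → Int × Bool
  | [], count => (count, false)
  | s :: rest, count =>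
    let c : Int := if s - mid < 0 then count + 1 else 0
    if c = k then (c, true) else scanA mid k rest c

-- the 'while start <= end' loop of A; the final 'else answer' arm is a totality guard for the
-- states (k ≤ 0) where the Python loop would never change its state (and hence never terminate)
def loopA (stones : List Int) (k answer start e : Int) : Int :=
  if h : start ≤ e then
    let mid := PySem.Int.floordiv (start + e) 2
    let r := scanA mid k stones 0
    if r.1 < k then loopA stones k mid (mid + 1) (if r.2 then mid - 1 else e)
    else if r.2 = true then loopA stones k answer start (mid - 1)
    else answer
  else answer
termination_by (e + 1 - start).toNat
decreasing_by
  · have hb := PySem.Int.floordiv_two_mid_bounds (lo := start) (hi := e) h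
    split <;> omega
  · have hb := PySem.Int.floordiv_two_mid_bounds (lo := start) (hi := e) h
    omega

def solution (stones : List Int) (k : Int) : Int :=
  match PySem.List.max? stones (fun x => x) with
  | none => 0   -- Python: max([]) raises ValueError; excluded by Pre_solution
  | some m => loopA stones k 0 0 m

-- ===== PORT B =====
def solution_alt (stones : List Int) (k : Int) : Int :=
  let n : Int := stones.length
  let w := min k n   -- a window never extends past the list
  -- prefix maxima within blocks of size w
  let pref := (PySem.List.pyRange 0 n 1).foldl (fun (st : List Int × Int) i =>
      let s := PySem.List.pyGetD stones i 0
      let cur := if PySem.Int.mod i w = 0 then s else max st.2 s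
      (st.1 ++ [cur], cur)) ([], 0)
  -- suffix maxima within blocks of size w (built back-to-front, then reversed)
  let suf0 := (PySem.List.pyRange (n - 1) (-1) (-1)).foldl (fun (st : List Int × Int) i =>
      let s := PySem.List.pyGetD stones i 0
      let cur := if PySem.Int.mod i w = w - 1 ∨ i = n - 1 then s else max st.2 s
      (st.1 ++ [cur], cur)) ([], 0)
  let suf := suf0.1.reverse
  let best := (PySem.List.pyRange 0 (n - w + 1) 1).foldl (fun (best : Option Int) i =>
      let m := max (PySem.List.pyGetD suf i 0) (PySem.List.pyGetD pref.1 (i + w - 1) 0)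
      match best with
      | none => some m
      | some b => if m < b then some m else some b) none
  max (best.getD 0) 0   -- Python: max(best, 0); best is None only when n = 0, excluded by Pre_solution

-- ===== PRECONDITION & SPEC =====
-- Pre_ excludes: stones = [] (A raises ValueError on max([])) and k ≤ 0, where no window exists
-- (A diverges for k < 0 whenever max(stones) ≥ 0 and returns the accidental value 0 otherwise,
-- while B raises ZeroDivisionError / IndexError there).
def Pre_solution (stones : List Int) (k : Int) : Prop :=
  stones ≠ [] ∧ 1 ≤ k
instance (stones : List Int) (k : Int) : Decidable (Pre_solution stones k) := by
  unfold Pre_solution; infer_instance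

def pvWitness_solution : List Int × Int := ([2, 1, 3], 2)

def Spec_solution (stones : List Int) (k : Int) (out : Int) : Prop :=
  out = solution_alt stones k
instance (stones : List Int) (k : Int) (out : Int) : Decidable (Spec_solution stones k out) := by
  unfold Spec_solution; infer_instance

-- ===== CLAIM (what is proved, stated in full; the proofs are below) =====
def Claim_equal_solution : Prop := ∀ (stones : List Int) (k : Int), Dom_solution stones k → Pre_solution stones k → Spec_solution stones k (solution stones k)

-- ===== LEMMAS AND PROOFS =====

-- max of stones[a..a+m] (indices read with default 0; only used at in-range indices)
def segMaxN (l : List Int) (a : Nat) : Nat → Int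
  | 0 => l.getD a 0
  | m + 1 => max (segMaxN l a m) (l.getD (a + m + 1) 0)

-- min over i ∈ [0, c] of the max of the window of length k starting at i
def wmins (l : List Int) (k : Nat) : Nat → Int
  | 0 => segMaxN l 0 (k - 1)
  | c + 1 => min (wmins l k c) (segMaxN l (c + 1) (k - 1))

-- the common specification value: minimum over all length-k windows of the window maximum
def Tval (l : List Int) (k : Nat) : Int := wmins l k (l.length - k)

-- 'some window of k consecutive entries is entirely < m'
def RunP (l : List Int) (k : Nat) (m : Int) : Prop :=
  ∃ i : Nat, i + k ≤ l.length ∧ ∀ j < k, l.getD (i + j) 0 < m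

theorem segMaxN_lt_iff (l : List Int) (a : Nat) (m : Nat) (x : Int) :
    segMaxN l a m < x ↔ ∀ j ≤ m, l.getD (a + j) 0 < x := by
  induction m with
  | zero => simp [segMaxN]
  | succ m ih =>
    simp only [segMaxN, max_lt_iff, ih]
    constructor
    · rintro ⟨h1, h2⟩ j hj
      rcases Nat.lt_or_ge j (m + 1) with h | h
      · exact h1 j (by omega)
      · have : j = m + 1 := by omega
        simpa [this] using h2
    · intro h
      exact ⟨fun j hj => h j (by omega), h (m + 1) (by omega)⟩

theorem segMaxN_le (l : List Int) (a m : Nat) (x : Int)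
    (h : ∀ j ≤ m, l.getD (a + j) 0 ≤ x) : segMaxN l a m ≤ x := by
  induction m with
  | zero => simpa [segMaxN] using h 0 (by omega)
  | succ m ih =>
    simp only [segMaxN, max_le_iff]
    exact ⟨ih (fun j hj => h j (by omega)), h (m + 1) (by omega)⟩

theorem getD_le_segMaxN (l : List Int) (a m j : Nat) (hj : j ≤ m) :
    l.getD (a + j) 0 ≤ segMaxN l a m := by
  induction m with
  | zero =>
    have : j = 0 := by omega
    simp [this, segMaxN]
  | succ m ih =>
    simp only [segMaxN, le_max_iff]
    rcases Nat.lt_or_ge j (m + 1) with h | h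
    · exact Or.inl (ih (by omega))
    · have : j = m + 1 := by omega
      subst this
      exact Or.inr le_rfl

theorem segMaxN_split (l : List Int) (a p q : Nat) :
    segMaxN l a (p + q + 1) = max (segMaxN l a p) (segMaxN l (a + p + 1) q) := by
  induction q with
  | zero => simp [segMaxN]
  | succ q ih =>
    have : p + (q + 1) + 1 = (p + q + 1) + 1 := by omega
    rw [this]
    show max (segMaxN l a (p + q + 1)) (l.getD (a + (p + q + 1) + 1) 0) = _
    rw [ih]
    have : a + (p + q + 1) + 1 = (a + p + 1) + q + 1 := by omega
    rw [this, max_assoc]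
    rfl

theorem segMaxN_cons (l : List Int) (a m : Nat) :
    segMaxN l a (m + 1) = max (l.getD a 0) (segMaxN l (a + 1) m) := by
  have h := segMaxN_split l a 0 m
  simpa [segMaxN] using h

theorem wmins_lt_iff (l : List Int) (k c : Nat) (x : Int) :
    wmins l k c < x ↔ ∃ i ≤ c, segMaxN l i (k - 1) < x := by
  induction c with
  | zero => simp [wmins]
  | succ c ih =>
    simp only [wmins, min_lt_iff, ih]
    constructor
    · rintro (⟨i, hi, h⟩ | h)
      · exact ⟨i, by omega, h⟩
      · exact ⟨c + 1, by omega, h⟩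
    · rintro ⟨i, hi, h⟩
      rcases Nat.lt_or_ge i (c + 1) with hlt | hge
      · exact Or.inl ⟨i, by omega, h⟩
      · have : i = c + 1 := by omega
        exact Or.inr (this ▸ h)

theorem wmins_le_seg (l : List Int) (k c i : Nat) (h : i ≤ c) :
    wmins l k c ≤ segMaxN l i (k - 1) := by
  induction c with
  | zero =>
    have : i = 0 := by omega
    simp [wmins, this]
  | succ c ih =>
    simp only [wmins, min_le_iff]
    rcases Nat.lt_or_ge i (c + 1) with hlt | hge
    · exact Or.inl (ih (by omega))
    · have : i = c + 1 := by omega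
      exact Or.inr (by rw [this])

theorem RunP_iff_T_lt (l : List Int) (k : Nat) (m : Int) (hk : 1 ≤ k) (hn : k ≤ l.length) :
    RunP l k m ↔ Tval l k < m := by
  rw [Tval, wmins_lt_iff]
  constructor
  · rintro ⟨i, hi, h⟩
    refine ⟨i, by omega, ?_⟩
    rw [segMaxN_lt_iff]
    intro j hj
    exact h j (by omega)
  · rintro ⟨i, hi, h⟩
    rw [segMaxN_lt_iff] at h
    exact ⟨i, by omega, fun j hj => h j (by omega)⟩

theorem T_le_of_mem_bound (l : List Int) (k : Nat) (M : Int) (hk : 1 ≤ k) (hn : k ≤ l.length)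
    (hM : ∀ y ∈ l, y ≤ M) : Tval l k ≤ M := by
  have h0 : Tval l k ≤ segMaxN l 0 (k - 1) := wmins_le_seg l k (l.length - k) 0 (by omega)
  refine le_trans h0 (segMaxN_le l 0 (k - 1) M ?_)
  intro j hj
  have hjl : 0 + j < l.length := by omega
  have : l.getD (0 + j) 0 = l[0 + j] := List.getD_eq_getElem l 0 hjl
  rw [this]
  exact hM _ (List.getElem_mem hjl)

-- ===== the scan (A's inner loop) and the binary search (A's outer loop) =====

theorem allLt_shift (s : Int) (rest : List Int) (t : Nat) (m : Int) (ht : 1 ≤ t) (hs : s < m) :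
    (∀ j < t, (s :: rest).getD j 0 < m) ↔ (∀ j < t - 1, rest.getD j 0 < m) := by
  constructor
  · intro h j hj
    have := h (j + 1) (by omega)
    simpa using this
  · intro h j hj
    cases j with
    | zero => simpa using hs
    | succ j => simpa using h j (by omega)

theorem RunP_cons_iff (s : Int) (rest : List Int) (k : Nat) (m : Int) (hk : 1 ≤ k) :
    RunP (s :: rest) k m ↔
      ((k ≤ rest.length + 1 ∧ ∀ j < k, (s :: rest).getD j 0 < m) ∨ RunP rest k m) := by
  constructor
  · rintro ⟨i, hi, h⟩
    cases i with
    | zero => exact Or.inl ⟨by simpa using hi, by simpa using h⟩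
    | succ i =>
      refine Or.inr ⟨i, by simp at hi; omega, fun j hj => ?_⟩
      have := h j hj
      simpa [Nat.succ_add] using this
  · rintro (⟨h1, h2⟩ | ⟨i, hi, h⟩)
    · exact ⟨0, by simp; omega, by simpa using h2⟩
    · refine ⟨i + 1, by simp; omega, fun j hj => ?_⟩
      have := h j hj
      simpa [Nat.succ_add] using this

theorem run0_imp_RunP (l : List Int) (k : Nat) (m : Int)
    (h1 : k ≤ l.length) (h2 : ∀ j < k, l.getD j 0 < m) : RunP l k m :=
  ⟨0, by omega, by simpa using h2⟩

theorem scan_spec (mid : Int) (k' : Nat) (hk : 1 ≤ k') :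
    ∀ (l : List Int) (c : Nat), c < k' →
      (((scanA mid (k' : Int) l (c : Int)).2 = true) ↔
        (RunP l k' mid ∨ (k' - c ≤ l.length ∧ ∀ j < k' - c, l.getD j 0 < mid))) := by
  intro l
  induction l with
  | nil =>
    intro c hc
    simp only [scanA, List.length_nil]
    constructor
    · intro h; exact absurd h (by simp)
    · rintro (⟨i, hi, _⟩ | ⟨h1, _⟩)
      · simp at hi; omega
      · omega
  | cons s rest ih =>
    intro c hc
    by_cases hs : s - mid < 0
    · -- s < mid
      have hs' : s < mid := by omega
      by_cases heq : c + 1 = k'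
      · -- break: count reaches k'
        have : ((c : Int) + 1) = (k' : Int) := by exact_mod_cast heq
        simp only [scanA, if_pos hs, this, if_pos rfl]
        constructor
        · intro _
          refine Or.inr ⟨by simp; omega, fun j hj => ?_⟩
          have : j = 0 := by omega
          simpa [this] using hs'
        · intro _; rfl
      · have hlt : c + 1 < k' := by omega
        have hne : ¬ ((c : Int) + 1 = (k' : Int)) := by
          intro h; exact heq (by exact_mod_cast h)
        have step : (scanA mid (k' : Int) (s :: rest) (c : Int)).2
            = (scanA mid (k' : Int) rest ((c + 1 : Nat) : Int)).2 := by
          simp only [scanA, if_pos hs]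
          rw [if_neg (by push_cast; exact hne)]
          norm_num
        rw [step, ih (c + 1) hlt]
        rw [RunP_cons_iff s rest k' mid hk]
        constructor
        · rintro (hr | ⟨h1, h2⟩)
          · exact Or.inl (Or.inr hr)
          · refine Or.inr ⟨by simp; omega, ?_⟩
            rw [allLt_shift s rest (k' - c) mid (by omega) hs']
            intro j hj; exact h2 j (by omega)
        · rintro ((⟨h1, h2⟩ | hr) | ⟨h1, h2⟩)
          · -- run at 0 of s :: rest implies tail condition
            refine Or.inr ⟨by omega, fun j hj => ?_⟩
            have := h2 (j + 1) (by omega)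
            simpa using this
          · exact Or.inl hr
          · refine Or.inr ⟨by simp at h1; omega, ?_⟩
            rw [allLt_shift s rest (k' - c) mid (by omega) hs'] at h2
            intro j hj; exact h2 j (by omega)
    · -- s ≥ mid: reset to 0
      have hs' : ¬ s < mid := by omega
      have hne : ¬ ((0 : Int) = (k' : Int)) := by
        intro h
        have : k' = 0 := by exact_mod_cast h.symm
        omega
      have step : (scanA mid (k' : Int) (s :: rest) (c : Int)).2
          = (scanA mid (k' : Int) rest ((0 : Nat) : Int)).2 := by
        simp only [scanA, if_neg hs]
        rw [if_neg (by push_cast; exact hne)]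
        norm_num
      rw [step, ih 0 (by omega)]
      rw [RunP_cons_iff s rest k' mid hk]
      have habs : ¬ (k' - c ≤ rest.length + 1 ∧ ∀ j < k' - c, (s :: rest).getD j 0 < mid) := by
        rintro ⟨h1, h2⟩
        have := h2 0 (by omega)
        simp at this
        omega
      have habs0 : ¬ (k' ≤ rest.length + 1 ∧ ∀ j < k', (s :: rest).getD j 0 < mid) := by
        rintro ⟨h1, h2⟩
        have := h2 0 (by omega)
        simp at this
        omega
      constructor
      · rintro (hr | ⟨h1, h2⟩)
        · exact Or.inl (Or.inr hr)
        · exact Or.inl (Or.inr (run0_imp_RunP rest k' mid (by omega) h2))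
      · rintro ((h0 | hr) | h2)
        · exact absurd h0 habs0
        · exact Or.inl hr
        · exact absurd h2 habs

theorem scan_true_eq (mid k : Int) :
    ∀ (l : List Int) (c : Int), (scanA mid k l c).2 = true → (scanA mid k l c).1 = k := by
  intro l
  induction l with
  | nil => intro c h; simp [scanA] at h
  | cons s rest ih =>
    intro c h
    by_cases hc : (if s - mid < 0 then c + 1 else 0) = k
    · simp only [scanA, if_pos hc] at h ⊢
      exact hc
    · simp only [scanA, if_neg hc] at h ⊢
      exact ih _ h

theorem scan_false_lt (mid : Int) (k' : Nat) (hk : 1 ≤ k') :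
    ∀ (l : List Int) (c : Nat), c < k' →
      (scanA mid (k' : Int) l (c : Int)).2 = false →
      (scanA mid (k' : Int) l (c : Int)).1 < (k' : Int) := by
  intro l
  induction l with
  | nil =>
    intro c hc _
    simp only [scanA]
    exact_mod_cast hc
  | cons s rest ih =>
    intro c hc h
    by_cases hs : s - mid < 0
    · by_cases heq : c + 1 = k'
      · exfalso
        have heq' : ((c : Int) + 1) = (k' : Int) := by exact_mod_cast heq
        simp only [scanA, if_pos hs, heq', if_pos rfl] at h
        exact Bool.true_eq_false.mp h
      · have hne : ¬ ((c : Int) + 1 = (k' : Int)) := by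
          intro h'; exact heq (by exact_mod_cast h')
        have e1 : scanA mid (k' : Int) (s :: rest) (c : Int)
            = scanA mid (k' : Int) rest ((c + 1 : Nat) : Int) := by
          simp only [scanA, if_pos hs]
          rw [if_neg (by push_cast; exact hne)]
          norm_num
        rw [e1] at h ⊢
        exact ih (c + 1) (by omega) h
    · have hne : ¬ ((0 : Int) = (k' : Int)) := by
        intro h'
        have : k' = 0 := by exact_mod_cast h'.symm
        omega
      have e1 : scanA mid (k' : Int) (s :: rest) (c : Int)
          = scanA mid (k' : Int) rest ((0 : Nat) : Int) := by
        simp only [scanA, if_neg hs]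
        rw [if_neg (by push_cast; exact hne)]
        norm_num
      rw [e1] at h ⊢
      exact ih 0 (by omega) h

theorem loopA_unfold (stones : List Int) (k answer start e : Int) (h : start ≤ e) :
    loopA stones k answer start e =
      (if (scanA (PySem.Int.floordiv (start + e) 2) k stones 0).1 < k then
        loopA stones k (PySem.Int.floordiv (start + e) 2) (PySem.Int.floordiv (start + e) 2 + 1)
          (if (scanA (PySem.Int.floordiv (start + e) 2) k stones 0).2 then
            PySem.Int.floordiv (start + e) 2 - 1 else e)
      else if (scanA (PySem.Int.floordiv (start + e) 2) k stones 0).2 = true then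
        loopA stones k answer start (PySem.Int.floordiv (start + e) 2 - 1)
      else answer) := by
  rw [loopA.eq_def, dif_pos h]

theorem loopA_base (stones : List Int) (k answer start e : Int) (h : ¬ start ≤ e) :
    loopA stones k answer start e = answer := by
  rw [loopA.eq_def, dif_neg h]

theorem loopA_eq (stones : List Int) (k T lo hi : Int)
    (hbr : ∀ mid, lo ≤ mid → mid ≤ hi → ((scanA mid k stones 0).2 = true ↔ T < mid))
    (hcnt : ∀ mid, (scanA mid k stones 0).2 = false → (scanA mid k stones 0).1 < k)
    (hceq : ∀ mid, (scanA mid k stones 0).2 = true → (scanA mid k stones 0).1 = k) :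
    ∀ answer start e, lo ≤ start → e ≤ hi → loopA stones k answer start e =
      if start ≤ e then (if T < start then answer else min T e) else answer := by
  suffices H : ∀ (meas : Nat) (answer start e : Int), (e + 1 - start).toNat ≤ meas →
      lo ≤ start → e ≤ hi →
      loopA stones k answer start e =
        if start ≤ e then (if T < start then answer else min T e) else answer by
    intro answer start e hlo hhi
    exact H (e + 1 - start).toNat answer start e le_rfl hlo hhi
  intro meas
  induction meas with
  | zero =>
    intro answer start e hm _ _
    have hse : ¬ start ≤ e := by omega
    rw [loopA_base stones k answer start e hse, if_neg hse]
  | succ meas ih =>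
    intro answer start e hm hlo hhi
    by_cases hse : start ≤ e
    · rw [loopA_unfold stones k answer start e hse, if_pos hse]
      have hmb : start ≤ PySem.Int.floordiv (start + e) 2 ∧ PySem.Int.floordiv (start + e) 2 ≤ e :=
        PySem.Int.floordiv_two_mid_bounds (lo := start) (hi := e) hse
      generalize hg : PySem.Int.floordiv (start + e) 2 = mid at hmb ⊢
      obtain ⟨hm1, hm2⟩ := hmb
      by_cases hb : (scanA mid k stones 0).2 = true
      · -- broke: T < mid, count = k, so not (count < k)
        have hT : T < mid := (hbr mid (by omega) (by omega)).mp hb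
        have hcq := hceq mid hb
        rw [if_neg (by rw [hcq]; omega), if_pos hb,
          ih answer start (mid - 1) (by omega) (by omega) (by omega)]
        by_cases h2 : start ≤ mid - 1
        · rw [if_pos h2]
          by_cases h3 : T < start
          · rw [if_pos h3, if_pos h3]
          · rw [if_neg h3, if_neg h3]
            omega
        · rw [if_neg h2, if_pos (by omega)]
      · -- did not break: T ≥ mid, count < k
        have hb' : (scanA mid k stones 0).2 = false := by
          simpa using hb
        have hT : ¬ T < mid := by
          intro h
          have := (hbr mid (by omega) (by omega)).mpr h
          rw [this] at hb'
          cases hb'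
        have hc := hcnt mid hb'
        have hns : ¬ T < start := by omega
        rw [if_pos hc, hb', if_neg (by simp),
          ih mid (mid + 1) e (by omega) (by omega) (by omega), if_neg hns]
        by_cases h2 : mid + 1 ≤ e
        · rw [if_pos h2]
          by_cases h3 : T < mid + 1
          · rw [if_pos h3]
            omega
          · rw [if_neg h3]
        · rw [if_neg h2]
          omega
    · rw [loopA_base stones k answer start e hse, if_neg hse]

theorem solutionA_eq (stones : List Int) (k : Int) (hne : stones ≠ [])
    (hk : 1 ≤ k) :
    solution stones k =
      if Tval stones (min k.toNat stones.length) < 0 then 0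
      else Tval stones (min k.toNat stones.length) := by
  have hn1 : 1 ≤ stones.length := List.length_pos_iff.mpr hne
  have hk1 : 1 ≤ k.toNat := by omega
  have hkc : k = (k.toNat : Int) := by omega
  have hw1 : 1 ≤ min k.toNat stones.length := by omega
  have hw2 : min k.toNat stones.length ≤ stones.length := by omega
  obtain ⟨M, hM⟩ : ∃ M, PySem.List.max? stones (fun x => x) = some M := by
    cases hMM : PySem.List.max? stones (fun x => x) with
    | none => exact absurd ((PySem.List.max?_eq_none_iff stones (fun x => x)).mp hMM) hne
    | some M => exact ⟨M, rfl⟩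
  have hMmax : ∀ y ∈ stones, y ≤ M := by
    intro y hy
    exact PySem.List.max?_isMax hM y hy
  have hTM : Tval stones (min k.toNat stones.length) ≤ M :=
    T_le_of_mem_bound stones (min k.toNat stones.length) M hw1 hw2 hMmax
  have hbrRun : ∀ mid, ((scanA mid k stones 0).2 = true ↔ RunP stones k.toNat mid) := by
    intro mid
    rw [hkc, Int.toNat_natCast]
    have h0 := scan_spec mid k.toNat hk1 stones 0 (by omega)
    rw [Nat.cast_zero] at h0
    rw [h0]
    constructor
    · rintro (hr | ⟨h1, h2⟩)
      · exact hr
      · exact run0_imp_RunP stones k.toNat mid (by omega) (by simpa using h2)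
    · intro hr
      exact Or.inl hr
  have hbr : ∀ mid, (0 : Int) ≤ mid → mid ≤ M →
      ((scanA mid k stones 0).2 = true ↔ Tval stones (min k.toNat stones.length) < mid) := by
    intro mid _ hmidM
    rw [hbrRun mid]
    by_cases hcase : k.toNat ≤ stones.length
    · rw [show min k.toNat stones.length = k.toNat from by omega]
      exact RunP_iff_T_lt stones k.toNat mid hk1 hcase
    · -- k > n: there is no length-k window, and the full-list window maximum is ≥ M ≥ mid
      have hrun : ¬ RunP stones k.toNat mid := by
        rintro ⟨i, hi, _⟩
        omega
      have hfull : M ≤ Tval stones (min k.toNat stones.length) := by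
        rw [show min k.toNat stones.length = stones.length from by omega]
        obtain ⟨t, ht, hMt⟩ := List.mem_iff_getElem.mp (PySem.List.max?_mem hM)
        have : stones.getD (0 + t) 0 = M := by
          rw [List.getD_eq_getElem _ _ (by omega)]
          simpa using hMt
        unfold Tval
        rw [Nat.sub_self]
        show M ≤ segMaxN stones 0 (stones.length - 1)
        rw [← this]
        exact getD_le_segMaxN stones 0 (stones.length - 1) t (by omega)
      constructor
      · intro h
        exact absurd h hrun
      · intro h
        omega
  have hcnt : ∀ mid, (scanA mid k stones 0).2 = false → (scanA mid k stones 0).1 < k := by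
    intro mid h
    rw [hkc] at h ⊢
    have := scan_false_lt mid k.toNat hk1 stones 0 (by omega)
    rw [Nat.cast_zero] at this
    exact this h
  have hceq : ∀ mid, (scanA mid k stones 0).2 = true → (scanA mid k stones 0).1 = k :=
    fun mid h => scan_true_eq mid k stones 0 h
  rw [solution, hM]
  show loopA stones k 0 0 M = _
  rw [loopA_eq stones k (Tval stones (min k.toNat stones.length)) 0 M hbr hcnt hceq 0 0 M
    le_rfl le_rfl]
  by_cases h0M : (0 : Int) ≤ M
  · rw [if_pos h0M]
    by_cases hT0 : Tval stones (min k.toNat stones.length) < 0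
    · rw [if_pos hT0, if_pos hT0]
    · rw [if_neg hT0, if_neg hT0, min_eq_left hTM]
  · rw [if_neg h0M, if_pos (by omega)]

-- ===== B equals Tval: block prefix/suffix maxima =====

-- value of pref[j]: max of stones over the block prefix [j - j % k, j]
def prefSpec (l : List Int) (k' j : Nat) : Int := segMaxN l (j - j % k') (j % k')

-- value of suf[j]: max of stones over the block suffix [j, min(block end, n-1)]
def sufSpec (l : List Int) (k' j : Nat) : Int :=
  segMaxN l j (min (j + (k' - 1 - j % k')) (l.length - 1) - j)

theorem nat_succ_mod (t k' : Nat) (hk : 0 < k') :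
    (t + 1) % k' = if t % k' = k' - 1 then 0 else t % k' + 1 := by
  have hd : k' * (t / k') + t % k' = t := Nat.div_add_mod t k'
  have hr : t % k' < k' := Nat.mod_lt t hk
  by_cases h : t % k' = k' - 1
  · rw [if_pos h]
    have he : k' * (t / k' + 1) = k' * (t / k') + k' := by ring
    have : t + 1 = k' * (t / k' + 1) := by omega
    rw [this, Nat.mul_mod_right]
  · rw [if_neg h]
    have : t + 1 = k' * (t / k') + (t % k' + 1) := by omega
    rw [this, Nat.mul_add_mod]
    exact Nat.mod_eq_of_lt (by omega)

theorem getD_map_range (f : Nat → Int) (n t : Nat) (h : t < n) :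
    ((List.range n).map f).getD t 0 = f t := by
  rw [List.getD_eq_getElem _ _ (by simpa using h)]
  simp

theorem reverse_map_range (g : Nat → Int) (n : Nat) :
    (((List.range n).map (fun t => g (n - 1 - t))).reverse) = (List.range n).map g := by
  apply List.ext_getElem
  · simp
  · intro i h1 h2
    simp only [List.getElem_reverse, List.getElem_map, List.getElem_range]
    simp only [List.length_reverse, List.length_map, List.length_range] at h1
    congr 1
    simp only [List.length_map, List.length_range]
    omega

theorem pref_fold_aux (stones : List Int) (k : Int) (hk : 1 ≤ k) :
    ∀ m, m ≤ stones.length →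
      (PySem.List.pyRange 0 (m : Int) 1).foldl (fun (st : List Int × Int) i =>
        let s := PySem.List.pyGetD stones i 0
        let cur := if PySem.Int.mod i k = 0 then s else max st.2 s
        (st.1 ++ [cur], cur)) ([], 0)
      = ((List.range m).map (prefSpec stones k.toNat),
         if m = 0 then 0 else prefSpec stones k.toNat (m - 1)) := by
  intro m
  induction m with
  | zero =>
    intro _
    simp [PySem.List.pyRange_one_eq_nil]
  | succ m ih =>
    intro hm
    have hcast : ((m + 1 : Nat) : Int) = (m : Int) + 1 := by push_cast; ring
    rw [hcast, PySem.List.pyRange_one_succ_right (by positivity), List.foldl_append,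
      ih (by omega)]
    have hkc : k = (k.toNat : Int) := by omega
    have hmod : PySem.Int.mod (m : Int) k = ((m % k.toNat : Nat) : Int) := by
      rw [hkc, Int.toNat_natCast, PySem.Int.mod_natCast]
    simp only [List.foldl_cons, List.foldl_nil, PySem.List.pyGetD_natCast, hmod]
    have hrange : List.range (m + 1) = List.range m ++ [m] := List.range_succ
    by_cases h0 : m % k.toNat = 0
    · rw [h0]
      simp only [Nat.cast_zero, if_pos rfl, hrange, List.map_append]
      rw [Prod.mk.injEq]
      constructor
      · simp [prefSpec, h0, segMaxN]
      · simp [prefSpec, h0, segMaxN]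
    · have hm1 : 1 ≤ m := by
        by_contra h
        have : m = 0 := by omega
        exact h0 (by simp [this])
    
      have hne : ¬ (((m % k.toNat : Nat) : Int) = 0) := by
        exact_mod_cast h0
      rw [if_neg hne]
      have hmne : ¬ (m = 0) := by omega
      simp only [if_neg hmne]
      have hk1 : 0 < k.toNat := by omega
      have hsm := nat_succ_mod (m - 1) k.toNat hk1
      rw [show m - 1 + 1 = m by omega] at hsm
      have hstep : prefSpec stones k.toNat m
          = max (prefSpec stones k.toNat (m - 1)) (stones.getD m 0) := by
        by_cases hb : (m - 1) % k.toNat = k.toNat - 1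
        · rw [if_pos hb] at hsm
          exact absurd hsm h0
        · rw [if_neg hb] at hsm
          unfold prefSpec
          rw [hsm]
          show segMaxN stones (m - ((m-1) % k.toNat + 1)) (((m-1) % k.toNat) + 1) = _
          rw [segMaxN]
          have e1 : m - ((m-1) % k.toNat + 1) = (m - 1) - (m - 1) % k.toNat := by
            have := Nat.mod_le (m - 1) k.toNat
            omega
          have e2 : (m - 1) - (m - 1) % k.toNat + ((m-1) % k.toNat) + 1 = m := by
            have := Nat.mod_le (m - 1) k.toNat
            omega
          rw [e1, e2]
      rw [Prod.mk.injEq]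
      constructor
      · rw [hrange, List.map_append]
        simp [hstep, max_comm]
      · simp [hstep, max_comm]

theorem sufSpec_reset (l : List Int) (k' j : Nat) (hk : 1 ≤ k') (hj : j < l.length)
    (h : j % k' = k' - 1 ∨ j = l.length - 1) : sufSpec l k' j = l.getD j 0 := by
  unfold sufSpec
  have e : min (j + (k' - 1 - j % k')) (l.length - 1) - j = 0 := by
    rcases h with h | h <;> omega
  rw [e]
  rfl

theorem sufSpec_step (l : List Int) (k' j : Nat) (hk : 1 ≤ k') (hj1 : j + 1 < l.length)
    (h : ¬ j % k' = k' - 1) :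
    sufSpec l k' j = max (l.getD j 0) (sufSpec l k' (j + 1)) := by
  have hsm := nat_succ_mod j k' (by omega)
  rw [if_neg h] at hsm
  have hmlt : j % k' < k' := Nat.mod_lt j (by omega)
  unfold sufSpec
  rw [hsm]
  have e : min (j + (k' - 1 - j % k')) (l.length - 1) - j
      = (min (j + 1 + (k' - 1 - (j % k' + 1))) (l.length - 1) - (j + 1)) + 1 := by
    omega
  rw [e]
  exact segMaxN_cons l j _

theorem suf_fold_aux (stones : List Int) (k : Int) (hk : 1 ≤ k) (hkn : k ≤ (stones.length : Int)) :
    ∀ m, m ≤ stones.length →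
      ((List.range m).map (fun t : Nat => (stones.length : Int) - 1 - (t : Int))).foldl
        (fun (st : List Int × Int) i =>
          let s := PySem.List.pyGetD stones i 0
          let cur := if PySem.Int.mod i k = k - 1 ∨ i = (stones.length : Int) - 1 then s
            else max st.2 s
          (st.1 ++ [cur], cur)) ([], 0)
      = ((List.range m).map (fun t => sufSpec stones k.toNat (stones.length - 1 - t)),
         if m = 0 then 0 else sufSpec stones k.toNat (stones.length - m)) := by
  intro m
  induction m with
  | zero => intro _; simp
  | succ m ih =>
    intro hm
    have hn1 : 1 ≤ stones.length := by omega
    rw [List.range_succ, List.map_append, List.map_append, List.foldl_append, ih (by omega)]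
    have hj : (stones.length : Int) - 1 - (m : Int) = ((stones.length - 1 - m : Nat) : Int) := by
      push_cast
      omega
    have hkc : k = (k.toNat : Int) := by omega
    have hmod : PySem.Int.mod ((stones.length - 1 - m : Nat) : Int) k
        = (((stones.length - 1 - m) % k.toNat : Nat) : Int) := by
      rw [hkc, Int.toNat_natCast, PySem.Int.mod_natCast]
    simp only [List.map_cons, List.map_nil, List.foldl_cons, List.foldl_nil, hj,
      PySem.List.pyGetD_natCast, hmod]
    set j := stones.length - 1 - m with hjdef
    have hcond : ((((j % k.toNat : Nat) : Int) = k - 1 ∨ ((j : Nat) : Int) = (stones.length : Int) - 1)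
        ↔ (j % k.toNat = k.toNat - 1 ∨ m = 0)) := by
      constructor
      · rintro (h | h)
        · left
          have : ((j % k.toNat : Nat) : Int) = ((k.toNat - 1 : Nat) : Int) := by
            rw [h, hkc]
            push_cast
            omega
          exact_mod_cast this
        · right
          omega
      · rintro (h | h)
        · left
          rw [h, hkc]
          push_cast
          omega
        · right
          omega
    have hjn : j < stones.length := by omega
    rw [Prod.mk.injEq]
    by_cases hc : j % k.toNat = k.toNat - 1 ∨ m = 0
    · have hc' := hcond.mpr hc
      rw [if_pos hc']
      have hres : sufSpec stones k.toNat j = stones.getD j 0 :=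
        sufSpec_reset stones k.toNat j (by omega) hjn (by omega)
      constructor
      · rw [hres]
      · have : stones.length - (m + 1) = j := by omega
        rw [this, if_neg (by omega), hres]
    · have hc' : ¬ (((j % k.toNat : Nat) : Int) = k - 1 ∨ ((j : Nat) : Int) = (stones.length : Int) - 1) := by
        rw [hcond]; exact hc
      rw [if_neg hc']
      rw [not_or] at hc
      obtain ⟨hc1, hc2⟩ := hc
      have hm0 : ¬ (m = 0) := hc2
      rw [if_neg hm0]
      have hjj : j + 1 = stones.length - m := by omega
      have hres : sufSpec stones k.toNat j = max (stones.getD j 0) (sufSpec stones k.toNat (j + 1)) :=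
        sufSpec_step stones k.toNat j (by omega) (by omega) hc1
      constructor
      · rw [hres, hjj, max_comm]
      · have : stones.length - (m + 1) = j := by omega
        rw [this, if_neg (show ¬ (m + 1 = 0) by omega), hres, hjj, max_comm]

theorem spec_union (l : List Int) (k' : Nat) (hk : 1 ≤ k') (i : Nat) (hik : i + k' ≤ l.length) :
    max (sufSpec l k' i) (prefSpec l k' (i + k' - 1)) = segMaxN l i (k' - 1) := by
  have hd : k' * (i / k') + i % k' = i := Nat.div_add_mod i k'
  have hr : i % k' < k' := Nat.mod_lt i (by omega)
  by_cases hr0 : i % k' = 0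
  · have hmod : (i + k' - 1) % k' = k' - 1 := by
      have e : i + k' - 1 = k' * (i / k') + (k' - 1) := by omega
      rw [e, Nat.mul_add_mod]
      exact Nat.mod_eq_of_lt (by omega)
    have hpre : prefSpec l k' (i + k' - 1) = segMaxN l i (k' - 1) := by
      unfold prefSpec
      rw [hmod]
      congr 1
      omega
    have hsuf : sufSpec l k' i = segMaxN l i (k' - 1) := by
      unfold sufSpec
      rw [hr0]
      congr 1
      omega
    rw [hpre, hsuf, max_self]
  · have hmul : k' * (i / k' + 1) = k' * (i / k') + k' := by ring
    have hmod : (i + k' - 1) % k' = i % k' - 1 := by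
      have e : i + k' - 1 = k' * (i / k' + 1) + (i % k' - 1) := by omega
      rw [e, Nat.mul_add_mod]
      exact Nat.mod_eq_of_lt (by omega)
    have hpre : prefSpec l k' (i + k' - 1) = segMaxN l (i + k' - i % k') (i % k' - 1) := by
      unfold prefSpec
      rw [hmod]
      congr 1
      omega
    have hsuf : sufSpec l k' i = segMaxN l i (k' - 1 - i % k') := by
      unfold sufSpec
      congr 1
      omega
    rw [hpre, hsuf]
    have hs := segMaxN_split l i (k' - 1 - i % k') (i % k' - 1)
    rw [show (k' - 1 - i % k') + (i % k' - 1) + 1 = k' - 1 from by omega,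
      show i + (k' - 1 - i % k') + 1 = i + k' - i % k' from by omega] at hs
    exact hs.symm

theorem best_fold_aux (stones : List Int) (k : Int) (hk : 1 ≤ k) (hkn : k ≤ (stones.length : Int)) :
    ∀ m, m ≤ stones.length - k.toNat + 1 →
      (PySem.List.pyRange 0 (m : Int) 1).foldl (fun (best : Option Int) i =>
        let mm := max (PySem.List.pyGetD ((List.range stones.length).map (sufSpec stones k.toNat)) i 0)
                      (PySem.List.pyGetD ((List.range stones.length).map (prefSpec stones k.toNat)) (i + k - 1) 0)
        match best with
        | none => some mm
        | some b => if mm < b then some mm else some b) none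
      = if m = 0 then none else some (wmins stones k.toNat (m - 1)) := by
  have hkc : k = (k.toNat : Int) := by omega
  have hk1 : 1 ≤ k.toNat := by omega
  have hk2 : k.toNat ≤ stones.length := by omega
  intro m
  induction m with
  | zero => intro _; simp [PySem.List.pyRange_one_eq_nil]
  | succ m ih =>
    intro hm
    have hcast : ((m + 1 : Nat) : Int) = (m : Int) + 1 := by push_cast; ring
    rw [hcast, PySem.List.pyRange_one_succ_right (by positivity), List.foldl_append,
      ih (by omega)]
    have hidx : ((m : Int) + k - 1) = ((m + k.toNat - 1 : Nat) : Int) := by omega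
    have hmlt : m < stones.length := by omega
    have hmklt : m + k.toNat - 1 < stones.length := by omega
    simp only [List.foldl_cons, List.foldl_nil, hidx, PySem.List.pyGetD_natCast,
      getD_map_range _ _ _ hmlt, getD_map_range _ _ _ hmklt]
    have hmm : max (sufSpec stones k.toNat m) (prefSpec stones k.toNat (m + k.toNat - 1))
        = segMaxN stones m (k.toNat - 1) := spec_union stones k.toNat hk1 m (by omega)
    rw [hmm]
    by_cases h0 : m = 0
    · subst h0
      simp [wmins]
    · rw [if_neg h0, if_neg (show ¬ (m + 1 = 0) by omega)]
      have hw : wmins stones k.toNat m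
          = min (wmins stones k.toNat (m - 1)) (segMaxN stones m (k.toNat - 1)) := by
        conv_lhs => rw [show m = (m - 1) + 1 from by omega]
        rw [wmins]
        rw [show (m - 1) + 1 = m from by omega]
      show (if segMaxN stones m (k.toNat - 1) < wmins stones k.toNat (m - 1)
          then some (segMaxN stones m (k.toNat - 1)) else some (wmins stones k.toNat (m - 1)))
        = some (wmins stones k.toNat (m + 1 - 1))
      rw [show m + 1 - 1 = m from rfl, hw]
      by_cases hle : wmins stones k.toNat (m - 1) ≤ segMaxN stones m (k.toNat - 1)
      · rw [if_neg (by omega), min_eq_left hle]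
      · rw [if_pos (by omega), min_eq_right (by omega)]

theorem solution_alt_eq (stones : List Int) (k : Int) (hne : stones ≠ [])
    (hk : 1 ≤ k) :
    solution_alt stones k = max (Tval stones (min k (stones.length : Int)).toNat) 0 := by
  have hn1 : 1 ≤ stones.length := List.length_pos_iff.mpr hne
  have hwk : 1 ≤ min k (stones.length : Int) := by omega
  have hwn : min k (stones.length : Int) ≤ (stones.length : Int) := by omega
  unfold solution_alt
  simp only []
  rw [pref_fold_aux stones (min k (stones.length : Int)) hwk stones.length le_rfl]
  rw [PySem.List.pyRange_neg_one]
  rw [show (((stones.length : Int) - 1) - (-1)).toNat = stones.length from by omega]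
  rw [suf_fold_aux stones (min k (stones.length : Int)) hwk hwn stones.length le_rfl]
  simp only []
  rw [reverse_map_range (sufSpec stones (min k (stones.length : Int)).toNat) stones.length]
  rw [show ((stones.length : Int) - min k (stones.length : Int) + 1)
      = ((stones.length - (min k (stones.length : Int)).toNat + 1 : Nat) : Int) from by omega]
  rw [best_fold_aux stones (min k (stones.length : Int)) hwk hwn
    (stones.length - (min k (stones.length : Int)).toNat + 1) le_rfl]
  rw [if_neg (show ¬ (stones.length - (min k (stones.length : Int)).toNat + 1 = 0) by omega)]
  rw [show stones.length - (min k (stones.length : Int)).toNat + 1 - 1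
      = stones.length - (min k (stones.length : Int)).toNat from rfl]
  rfl

-- ===== D_ and assembly =====

-- ===== VERDICT (by name: the statement is the Claim_ definition above) =====
theorem solution_spec : Claim_equal_solution := by
  intro stones k _ hpre
  obtain ⟨hne, hk⟩ := hpre
  have hmm : (min k (stones.length : Int)).toNat = min k.toNat stones.length := by omega
  show solution stones k = solution_alt stones k
  rw [solutionA_eq stones k hne hk, solution_alt_eq stones k hne hk, hmm]
  split_ifs with h <;> omega
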